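-- pv_equiv track=rewrite | github.com/pypi-data/pypi-mirror-395 | packages/github-ioc-scanner/github_ioc_scanner-1.7.2.tar.gz/github_ioc_scanner-1.7.2/tests/test_new_features_performance.py | generate_file_with_secrets
-- ===== SOURCE A (Python) =====
-- def generate_file_with_secrets(num_lines: int, secrets_per_100_lines: int = 1) -> str:
--     """Generate file content with embedded secrets."""
--     lines = []
--     secret_interval = (100 // secrets_per_100_lines) if secrets_per_100_lines > 0 else 0
--     for i in range(num_lines):
--         if secret_interval > 0 and i % secret_interval == 0:
--             # Add a secret
--             secret_type = i % 5
--             if secret_type == 0: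
--                 lines.append(f'AWS_ACCESS_KEY_ID=AKIAIOSFODNN7EXAMPLE')
--             elif secret_type == 1:
--                 lines.append(f'GITHUB_TOKEN=ghp_xxxxxxxxxxxxxxxxxxxxxxxxxxxxxxxxxxxx')
--             elif secret_type == 2:
--                 lines.append(f'SLACK_TOKEN=xoxb-FAKE-TOKEN-FOR-TESTING')
--             elif secret_type == 3:
--                 lines.append(f'api_key = "sk_test_FAKE_KEY_FOR_TESTING"')
--             else:
--                 lines.append(f'-----BEGIN PRIVATE KEY-----')
--         else:
--             lines.append(f'// Line {i}: Some regular code content here')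
--
--     return '\n'.join(lines)
-- ===== SOURCE B (Python) =====
-- def generate_file_with_secrets(num_lines: int, secrets_per_100_lines: int = 1) -> str:
--     """Generate file content with embedded secrets (fill-then-overwrite)."""
--     secret_strings = [
--         'AWS_ACCESS_KEY_ID=AKIAIOSFODNN7EXAMPLE',
--         'GITHUB_TOKEN=ghp_xxxxxxxxxxxxxxxxxxxxxxxxxxxxxxxxxxxx',
--         'SLACK_TOKEN=xoxb-FAKE-TOKEN-FOR-TESTING',
--         'api_key = "sk_test_FAKE_KEY_FOR_TESTING"',
--         '-----BEGIN PRIVATE KEY-----',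
--     ]
--     secret_interval = (100 // secrets_per_100_lines) if secrets_per_100_lines > 0 else 0
--     lines = [f'// Line {i}: Some regular code content here' for i in range(num_lines)]
--     if secret_interval > 0:
--         for i in range(0, num_lines, secret_interval):
--             lines[i] = secret_strings[i % 5]
--     return '\n'.join(lines)
-- ===== Notes on version B (the rewrite author's own statement) =====
-- stated objective: alternative
-- what changed: A's single pass that tests i % secret_interval on every line is replaced by a fill-then-overwrite two-pass structure: a comprehension builds all regular lines, then a stepped loop over range(0, num_lines, secret_interval) overwrites exactly the secret positions, indexing the secret text by i % 5 from a 5-element list instead of an if/elif chain.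
import Mathlib
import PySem

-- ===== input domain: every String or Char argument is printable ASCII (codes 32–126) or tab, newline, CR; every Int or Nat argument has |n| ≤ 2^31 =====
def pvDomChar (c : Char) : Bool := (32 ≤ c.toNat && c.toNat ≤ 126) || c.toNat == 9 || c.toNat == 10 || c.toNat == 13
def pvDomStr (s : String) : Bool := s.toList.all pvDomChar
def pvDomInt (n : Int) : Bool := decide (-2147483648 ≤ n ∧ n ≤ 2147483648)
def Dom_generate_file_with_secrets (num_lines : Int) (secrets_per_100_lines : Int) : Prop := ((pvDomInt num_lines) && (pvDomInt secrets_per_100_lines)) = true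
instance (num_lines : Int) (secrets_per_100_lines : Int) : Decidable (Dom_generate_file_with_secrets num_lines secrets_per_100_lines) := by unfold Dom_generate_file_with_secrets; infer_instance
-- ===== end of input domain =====

-- B rebuilds the file as a fill-then-overwrite two-pass (all regular lines first, then a
-- stepped pass over the secret positions) instead of A's single branching per-line pass;
-- objective: alternative decomposition, same asymptotic cost.


-- ===== PORT A =====
-- the if/elif chain of A, on secret_type = i % 5
def pvSecretChainA (secret_type : Int) : String :=
  if secret_type = 0 then "AWS_ACCESS_KEY_ID=AKIAIOSFODNN7EXAMPLE"
  else if secret_type = 1 then "GITHUB_TOKEN=ghp_xxxxxxxxxxxxxxxxxxxxxxxxxxxxxxxxxxxx"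
  else if secret_type = 2 then "SLACK_TOKEN=xoxb-FAKE-TOKEN-FOR-TESTING"
  else if secret_type = 3 then "api_key = \"sk_test_FAKE_KEY_FOR_TESTING\""
  else "-----BEGIN PRIVATE KEY-----"

-- f'// Line {i}: Some regular code content here'
def pvRegularLine (i : Int) : String :=
  "// Line " ++ PySem.Int.toStr i ++ ": Some regular code content here"

def generate_file_with_secrets (num_lines : Int) (secrets_per_100_lines : Int) : String :=
  let secret_interval : Int :=
    if secrets_per_100_lines > 0 then PySem.Int.floordiv 100 secrets_per_100_lines else 0
  let lines : List String :=
    (PySem.List.pyRange 0 num_lines 1).foldl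
      (fun acc i =>
        if secret_interval > 0 ∧ PySem.Int.mod i secret_interval = 0 then
          acc ++ [pvSecretChainA (PySem.Int.mod i 5)]
        else
          acc ++ [pvRegularLine i]) []
  PySem.Str.join "\n" lines

-- ===== PORT B =====
def pvSecretStrings : List String :=
  [ "AWS_ACCESS_KEY_ID=AKIAIOSFODNN7EXAMPLE"
  , "GITHUB_TOKEN=ghp_xxxxxxxxxxxxxxxxxxxxxxxxxxxxxxxxxxxx"
  , "SLACK_TOKEN=xoxb-FAKE-TOKEN-FOR-TESTING"
  , "api_key = \"sk_test_FAKE_KEY_FOR_TESTING\""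
  , "-----BEGIN PRIVATE KEY-----" ]

def generate_file_with_secrets_alt (num_lines : Int) (secrets_per_100_lines : Int) : String :=
  let secret_interval : Int :=
    if secrets_per_100_lines > 0 then PySem.Int.floordiv 100 secrets_per_100_lines else 0
  let lines : List String :=
    (PySem.List.pyRange 0 num_lines 1).map (fun i => pvRegularLine i)
  let lines : List String :=
    if secret_interval > 0 then
      -- lines[i] = secret_strings[i % 5]: i and i % 5 are in range for every i the loop visits,
      -- so the total forms pySetD / pyGetD are exact here
      (PySem.List.pyRange 0 num_lines secret_interval).foldl
        (fun ls i => PySem.List.pySetD ls i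
            (PySem.List.pyGetD pvSecretStrings (PySem.Int.mod i 5) "")) lines
    else lines
  PySem.Str.join "\n" lines

-- ===== PRECONDITION & SPEC =====
def Spec_generate_file_with_secrets (num_lines : Int) (secrets_per_100_lines : Int) (out : String) : Prop := out = generate_file_with_secrets_alt num_lines secrets_per_100_lines
instance (num_lines : Int) (secrets_per_100_lines : Int) (out : String) : Decidable (Spec_generate_file_with_secrets num_lines secrets_per_100_lines out) := by unfold Spec_generate_file_with_secrets; infer_instance

-- ===== CLAIM (what is proved, stated in full; the proofs are below) =====
def Claim_equal_generate_file_with_secrets : Prop := ∀ (num_lines : Int) (secrets_per_100_lines : Int), Dom_generate_file_with_secrets num_lines secrets_per_100_lines → Spec_generate_file_with_secrets num_lines secrets_per_100_lines (generate_file_with_secrets num_lines secrets_per_100_lines)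

-- ===== LEMMAS AND PROOFS =====

-- the value A appends at index i, as a single function of i
def pvLineAt (interval : Int) (i : Int) : String :=
  if interval > 0 ∧ PySem.Int.mod i interval = 0 then pvSecretChainA (PySem.Int.mod i 5)
  else pvRegularLine i

lemma pvLinesA_eq_map (n interval : Int) :
    (PySem.List.pyRange 0 n 1).foldl
      (fun acc i =>
        if interval > 0 ∧ PySem.Int.mod i interval = 0 then
          acc ++ [pvSecretChainA (PySem.Int.mod i 5)]
        else
          acc ++ [pvRegularLine i]) []
    = (PySem.List.pyRange 0 n 1).map (pvLineAt interval) := by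
  have h : (fun (acc : List String) (i : Int) =>
        if interval > 0 ∧ PySem.Int.mod i interval = 0 then
          acc ++ [pvSecretChainA (PySem.Int.mod i 5)]
        else
          acc ++ [pvRegularLine i])
      = fun acc i => acc ++ [pvLineAt interval i] := by
    funext acc i
    unfold pvLineAt
    split_ifs <;> rfl
  rw [h, PySem.List.foldl_append_singleton_eq_map]
  simp

-- the overwrite fold keeps the length
lemma pvFoldSet_length (v : Int → String) (P : List Int) (ls : List String) :
    (P.foldl (fun ls i => ls.set i.toNat (v i)) ls).length = ls.length := by
  induction P generalizing ls with
  | nil => rfl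
  | cons p P ih => simpa [List.foldl_cons] using ih (ls.set p.toNat (v p))

-- element j of the overwrite fold: v j on visited positions, the old value elsewhere
lemma pvFoldSet_getElem? (v : Int → String) (P : List Int) (ls : List String)
    (hP : ∀ p ∈ P, 0 ≤ p) (j : Nat) (hj : j < ls.length) :
    (P.foldl (fun ls i => ls.set i.toNat (v i)) ls)[j]?
      = some (if (j : Int) ∈ P then v j else ls[j]) := by
  induction P generalizing ls with
  | nil => simp [List.getElem?_eq_getElem hj]
  | cons p P ih =>
    have hp : 0 ≤ p := hP p (List.mem_cons_self)
    have hj2 : j < (ls.set p.toNat (v p)).length := by simpa using hj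
    rw [List.foldl_cons,
        ih (ls.set p.toNat (v p)) (fun q hq => hP q (List.mem_cons_of_mem _ hq)) hj2]
    have hset : (ls.set p.toNat (v p))[j]'hj2 = if p.toNat = j then v p else ls[j] :=
      List.getElem_set hj2
    by_cases hmem : (j : Int) ∈ P
    · rw [if_pos hmem, if_pos (List.mem_cons_of_mem _ hmem)]
    · rw [hset]
      by_cases hpj : p = (j : Int)
      · have h1 : p.toNat = j := by omega
        have hm2 : (j : Int) ∈ p :: P := by rw [← hpj]; exact List.mem_cons_self
        rw [if_neg hmem, if_pos h1, if_pos hm2, hpj]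
      · have h1 : p.toNat ≠ j := by omega
        have h2 : ¬ (j : Int) = p := fun h => hpj h.symm
        simp [hmem, h1, h2]

lemma pvSecret_lookup_eq_chain (i : Int) (h : 0 ≤ i) :
    PySem.List.pyGetD pvSecretStrings (PySem.Int.mod i 5) ""
      = pvSecretChainA (PySem.Int.mod i 5) := by
  set m := PySem.Int.mod i 5 with hm
  have h0 : 0 ≤ m := PySem.Int.mod_nonneg i (by norm_num)
  have h1 : m < 5 := PySem.Int.mod_lt i (by norm_num)
  interval_cases m <;> rfl

-- ===== VERDICT (by name: the statement is the Claim_ definition above) =====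
theorem generate_file_with_secrets_spec : Claim_equal_generate_file_with_secrets := by
  intro n s _
  unfold Spec_generate_file_with_secrets generate_file_with_secrets generate_file_with_secrets_alt
  dsimp only
  set interval : Int := if s > 0 then PySem.Int.floordiv 100 s else 0 with hint
  rw [pvLinesA_eq_map]
  congr 1
  by_cases hpos : interval > 0
  · -- overwrite pass: compare element by element
    rw [if_pos hpos]
    set v : Int → String := fun i => PySem.List.pyGetD pvSecretStrings (PySem.Int.mod i 5) "" with hv
    have hbody : ∀ (ls : List String), ∀ i ∈ PySem.List.pyRange 0 n interval,
        PySem.List.pySetD ls i (v i) = ls.set i.toNat (v i) := by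
      intro ls i hi
      exact PySem.List.pySetD_of_nonneg ls _ ((PySem.List.mem_pyRange_iff_of_pos hpos i).1 hi).1
    rw [PySem.List.foldl_congr_mem _ _ (fun ls i => ls.set i.toNat (v i)) _ hbody]
    set base : List String := (PySem.List.pyRange 0 n 1).map (fun i => pvRegularLine i) with hbase
    set P : List Int := PySem.List.pyRange 0 n interval with hP
    have hPnn : ∀ p ∈ P, (0:Int) ≤ p := fun p hp =>
      ((PySem.List.mem_pyRange_iff_of_pos hpos p).1 hp).1
    have hblen : base.length = (n - 0).toNat := by
      rw [hbase, List.length_map, PySem.List.length_pyRange_one]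
    have hflen : (P.foldl (fun ls i => ls.set i.toNat (v i)) base).length = base.length :=
      pvFoldSet_length v P base
    apply List.ext_getElem
    · rw [List.length_map, PySem.List.length_pyRange_one, hflen, hblen]
    · intro j hj1 hj2
      have hjb : j < base.length := by omega
      have hjn : (j : Int) < n := by
        rw [List.length_map, PySem.List.length_pyRange_one] at hj1; omega
      have hget := pvFoldSet_getElem? v P base hPnn j hjb
      rw [List.getElem?_eq_getElem hj2] at hget
      rw [List.getElem_map, PySem.List.getElem_pyRange_one, Option.some.inj hget]
      have hmem : ((j : Int) ∈ P) ↔ PySem.Int.mod (j : Int) interval = 0 := by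
        rw [hP, PySem.List.mem_pyRange_iff_of_pos hpos,
            PySem.Int.mod_eq_zero_iff_dvd]
        constructor
        · rintro ⟨-, -, hd⟩; simpa using hd
        · intro hd; exact ⟨by positivity, hjn, by simpa using hd⟩
      have hbj : base[j] = pvRegularLine (0 + (j : Int)) := by
        simp only [hbase, List.getElem_map, PySem.List.getElem_pyRange_one]
      by_cases hdvd : PySem.Int.mod (j : Int) interval = 0
      · rw [if_pos (hmem.2 hdvd), hv]
        simp only [pvLineAt, zero_add]
        rw [if_pos ⟨hpos, hdvd⟩, pvSecret_lookup_eq_chain _ (by positivity)]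
      · rw [if_neg (fun h => hdvd (hmem.1 h)), hbj]
        simp only [pvLineAt, zero_add]
        rw [if_neg (by tauto)]
  · rw [if_neg hpos]
    apply List.map_congr_left
    intro i _
    unfold pvLineAt
    rw [if_neg (by tauto)]
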